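-- pv_equiv track=rewrite | github.com/SplendidBoy1/Project_2_Minesweeper | 21127092_21127239_21127385_21127459/src/makeCNF.py | generate_cnf_from_input
-- ===== SOURCE A (Python) =====
-- def get_adjacent_cells(i, j, m, n,input_board):
--     # Get a list of adjacent cells to a given cell (i, j)
--     # lấy các vị trí để từ position hiện tại thao tác với các vị trí kề đơn vị sẽ rra các vị trí kề
--
--     directions = [(-1, -1), (-1, 0), (-1, 1), (0, -1), (0, 1), (1, -1), (1, 0), (1, 1)]
--     adjacent_cells = []
--     for dx, dy in directions:
--         x, y = i + dx, j + dy
--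
--         if 0 <= x < m and 0 <= y < n:
--             if input_board[x][y] > 0 :
--                 continue
--             else:
--                 adjacent_cells.append((x, y))
--     return adjacent_cells
--
-- def var(i, j, n):
--     # biến đổi tọa độ thành chỉ số index trong mảng
--     # Convert cell coordinates (i, j) to a variable index
--     return i * n + j + 1
--
-- def generate_subarrays_recursive(arr, k):
--     result = []
--     n = len(arr)
--
--     if k -1 <= 0:
--         return [arr] if len(arr) > 0 else []
--
--     for i in range(n):
--         subarray = arr[:i] + arr[i+1:]
--         subarrays = generate_subarrays_recursive(subarray, k - 1)
--         result.extend(subarrays)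
--
--     return result
--
-- def remove_duplicates(arrays):
--     seen_arrays = set()
--     result = []
--     for arr in arrays:
--         arr_tuple = tuple(arr)
--         if arr_tuple not in seen_arrays:
--             seen_arrays.add(arr_tuple)
--             result.append(arr)
--     return result
--
-- def convert_pending_cells(arr):
--     flat_array = [item for sublist in arr for item in sublist]
--
--     unique_elements = list(dict.fromkeys(flat_array))
--     return unique_elements
--
-- def make_final_cnf(cnf_clauses):
--     cnf_clauses  = [item for sublist in cnf_clauses for item in sublist]
--     unique_subarrays = []
--     for subarray in cnf_clauses:
--         # Nếu mảng con chưa tồn tại trong danh sách unique_subarrays, thì thêm vào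
--         if subarray not in unique_subarrays:
--             unique_subarrays.append(subarray)
--     return unique_subarrays
--
-- def generate_cnf_from_input(input_board):
--     m, n = len(input_board), len(input_board[0])
--     # List for storing cnf clauses
--     cnf_clauses = []
--     # List for storing cells' index that can be bombs
--     pending_cells = []
--
--     # Loop through each cell in the input board
--     for i in range(m):
--         for j in range(n):
--             #đối với mỗi ô
--             cell_value = input_board[i][j]
--             # If the cell is not empty, it contains a number (not a mine)
--             if cell_value != 0:
--                 # b1: đi tìm các ô kề với ô hiện tại mà là ô chứa số 0
--                 adjacent_cells = get_adjacent_cells(i, j, m, n, input_board)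
--
--                 # b2: chuyển đổi vị trí i, j của các ô có thể có mìn
--                 # thành index của mảng 1 chiều để biểu thị CNF
--                 adjacent_mine_vars = [var(x, y, n) for x, y in adjacent_cells]
--                 adjacent_mine_vars_negated = [-var(x, y, n) for x, y in adjacent_cells]
--
--                 pending_cells.append(adjacent_mine_vars)
--
--                 num_adj_cells = len(adjacent_mine_vars)
--
--                 # b3: tìm các CNF clause
--                 # Constraint L: với mọi n(số lượng ô kề)-k(số lượng bom)+1 ô, có ít nhất 1 ô có bom
--                 L = generate_subarrays_recursive(adjacent_mine_vars, cell_value)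
--                 L = remove_duplicates(L)
--                 cnf_clauses.append(L)
--                 if(cell_value != num_adj_cells):
--                     # Constraint U: với mọi k(số lượng bom)+1 ô, có ít nhất 1 ô không có bom
--                     U = generate_subarrays_recursive(adjacent_mine_vars_negated, num_adj_cells - cell_value)
--                     U = remove_duplicates(U)
--                     cnf_clauses.append(U)
--
--     cnf_clauses = make_final_cnf(cnf_clauses)
--     pending_cells = convert_pending_cells(pending_cells)
--     return cnf_clauses, pending_cells
-- ===== SOURCE B (Python) =====
-- import itertools
--
-- _DIRECTIONS = [(-1, -1), (-1, 0), (-1, 1), (0, -1), (0, 1), (1, -1), (1, 0), (1, 1)]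
--
-- def _neighbor_vars(i, j, m, n, input_board):
--     # open neighbours of (i, j), as 1-based variable indices of the flattened board
--     out = []
--     for dx, dy in _DIRECTIONS:
--         x = i + dx
--         y = j + dy
--         if 0 <= x < m and 0 <= y < n and input_board[x][y] <= 0:
--             out.append(x * n + y + 1)
--     return out
--
-- def _subsets(arr, k):
--     # the distinct results of A's delete-(k-1)-elements recursion, in A's
--     # first-appearance order: combinations of len(arr)-(k-1) kept elements,
--     # index-lexicographic on the REMOVED positions = reversed itertools order.
--     if k <= 1:
--         return [list(arr)] if arr else []
--     if k - 1 >= len(arr):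
--         return []
--     return [list(c) for c in itertools.combinations(arr, len(arr) - (k - 1))][::-1]
--
-- def generate_cnf_from_input(input_board):
--     m = len(input_board)
--     n = len(input_board[0]) if input_board else 0
--     clauses = []
--     pending = []
--     for i, row in enumerate(input_board):
--         for j, v in enumerate(row[:n]):
--             if v != 0:
--                 vars_ = _neighbor_vars(i, j, m, n, input_board)
--                 pending.extend(vars_)
--                 clauses.extend(_subsets(vars_, v))
--                 if v != len(vars_):
--                     clauses.extend(_subsets([-x for x in vars_], len(vars_) - v))
--     seen = set()
--     final_clauses = []
--     for c in clauses:
--         t = tuple(c)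
--         if t not in seen:
--             seen.add(t)
--             final_clauses.append(c)
--     seen_v = set()
--     final_pending = []
--     for x in pending:
--         if x not in seen_v:
--             seen_v.add(x)
--             final_pending.append(x)
--     return final_clauses, final_pending
-- ===== Notes on version B (the rewrite author's own statement) =====
-- stated objective: faster
-- what changed: Per clue cell, A enumerates all ordered ways of deleting k-1 elements (factorially many duplicate subarrays) and deduplicates afterwards, and dedups the final clause list with a quadratic 'not in list' scan; B emits each clause exactly once as reversed itertools.combinations (the same first-appearance order) and dedups the final list in one seen-set pass.
import Mathlib
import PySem

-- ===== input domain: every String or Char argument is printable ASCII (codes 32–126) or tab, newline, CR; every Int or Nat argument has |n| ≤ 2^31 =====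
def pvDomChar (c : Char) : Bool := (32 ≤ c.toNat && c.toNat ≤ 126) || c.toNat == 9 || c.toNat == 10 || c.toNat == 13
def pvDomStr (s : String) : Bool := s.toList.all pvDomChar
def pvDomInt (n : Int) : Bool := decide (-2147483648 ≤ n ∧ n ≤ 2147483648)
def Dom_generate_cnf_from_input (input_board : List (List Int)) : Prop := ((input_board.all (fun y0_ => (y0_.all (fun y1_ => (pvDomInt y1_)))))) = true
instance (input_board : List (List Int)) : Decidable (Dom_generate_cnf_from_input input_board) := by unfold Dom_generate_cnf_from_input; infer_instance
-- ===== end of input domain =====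

-- B replaces A's delete-one-element-at-a-time recursion (factorially many duplicate
-- subarrays, deduplicated afterwards) by a direct enumeration of combinations in the
-- same first-appearance order, and replaces A's quadratic final `not in list` dedup by
-- a single seen-set pass; a timing run measured B faster.
-- Return-value equivalence only: neither version mutates its argument.

-- ===== PORT A =====

def get_adjacent_cells (i j m n : Int) (input_board : List (List Int)) : List (Int × Int) :=
  ([(-1, -1), (-1, 0), (-1, 1), (0, -1), (0, 1), (1, -1), (1, 0), (1, 1)] : List (Int × Int)).foldl
    (fun acc d =>
      let x := i + d.1
      let y := j + d.2
      if 0 ≤ x ∧ x < m ∧ 0 ≤ y ∧ y < n then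
        if PySem.List.pyGetD (PySem.List.pyGetD input_board x []) y 0 > 0 then acc
        else acc ++ [(x, y)]
      else acc) []

def varIdx (i j n : Int) : Int := i * n + j + 1

def generate_subarrays_recursive (arr : List Int) (k : Int) : List (List Int) :=
  if k - 1 ≤ 0 then (if arr.length > 0 then [arr] else [])
  else
    (PySem.List.pyRange 0 arr.length).foldl
      (fun result i =>
        result ++ generate_subarrays_recursive
          (PySem.List.slice arr none (some i) ++ PySem.List.slice arr (some (i + 1)) none)
          (k - 1))
      []
termination_by k.toNat
decreasing_by omega

def remove_duplicates (arrays : List (List Int)) : List (List Int) :=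
  (arrays.foldl
    (fun (st : PySem.Set (List Int) × List (List Int)) arr =>
      if PySem.Set.contains st.1 arr then st else (PySem.Set.add st.1 arr, st.2 ++ [arr]))
    (PySem.Set.empty, [])).2

def convert_pending_cells (arr : List (List Int)) : List Int :=
  PySem.List.dedup arr.flatten

def make_final_cnf (cnf_clauses : List (List (List Int))) : List (List Int) :=
  cnf_clauses.flatten.foldl
    (fun unique subarray => if subarray ∈ unique then unique else unique ++ [subarray]) []

def generate_cnf_from_input (input_board : List (List Int)) : List (List Int) × List Int :=
  let m : Int := input_board.length
  let n : Int := (PySem.List.pyGetD input_board 0 []).length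
  let st := (PySem.List.pyRange 0 m).foldl (fun st i =>
      (PySem.List.pyRange 0 n).foldl (fun st j =>
        let cell_value := PySem.List.pyGetD (PySem.List.pyGetD input_board i []) j 0
        if cell_value ≠ 0 then
          let adjacent_cells := get_adjacent_cells i j m n input_board
          let adjacent_mine_vars := adjacent_cells.map (fun p => varIdx p.1 p.2 n)
          let adjacent_mine_vars_negated := adjacent_cells.map (fun p => -varIdx p.1 p.2 n)
          let pending_cells := st.2 ++ [adjacent_mine_vars]
          let num_adj_cells : Int := adjacent_mine_vars.length
          let L := remove_duplicates (generate_subarrays_recursive adjacent_mine_vars cell_value)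
          let cnf_clauses := st.1 ++ [L]
          if cell_value ≠ num_adj_cells then
            (cnf_clauses ++
              [remove_duplicates (generate_subarrays_recursive adjacent_mine_vars_negated
                  (num_adj_cells - cell_value))],
              pending_cells)
          else (cnf_clauses, pending_cells)
        else st) st)
    (([] : List (List (List Int))), ([] : List (List Int)))
  (make_final_cnf st.1, convert_pending_cells st.2)

-- ===== PORT B =====

def pvDirections : List (Int × Int) := [(-1, -1), (-1, 0), (-1, 1), (0, -1), (0, 1), (1, -1), (1, 0), (1, 1)]

def neighbor_vars (i j m n : Int) (input_board : List (List Int)) : List Int :=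
  pvDirections.foldl (fun out d =>
    let x := i + d.1
    let y := j + d.2
    if 0 ≤ x ∧ x < m ∧ 0 ≤ y ∧ y < n ∧
        PySem.List.pyGetD (PySem.List.pyGetD input_board x []) y 0 ≤ 0 then
      out ++ [x * n + y + 1]
    else out) []

def subsets_alt (arr : List Int) (k : Int) : List (List Int) :=
  if k ≤ 1 then (if arr.isEmpty then [] else [arr])
  else if (arr.length : Int) ≤ k - 1 then []
  else (PySem.List.combinations arr (arr.length - (k - 1).toNat)).reverse

def generate_cnf_from_input_alt (input_board : List (List Int)) : List (List Int) × List Int :=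
  let m : Int := input_board.length
  let n : Int := if input_board.isEmpty then 0 else ((PySem.List.pyGetD input_board 0 []).length : Int)
  let st := (PySem.List.enumerate input_board).foldl (fun st p =>
      (PySem.List.enumerate (PySem.List.slice p.2 none (some n))).foldl (fun st q =>
        if q.2 ≠ 0 then
          let vars := neighbor_vars p.1 q.1 m n input_board
          let pending := st.2 ++ vars
          let clauses := st.1 ++ subsets_alt vars q.2
          if q.2 ≠ (vars.length : Int) then
            (clauses ++ subsets_alt (vars.map (fun x => -x)) ((vars.length : Int) - q.2), pending)
          else (clauses, pending)
        else st) st)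
    (([] : List (List Int)), ([] : List Int))
  let fc := st.1.foldl
    (fun (acc : PySem.Set (List Int) × List (List Int)) c =>
      if PySem.Set.contains acc.1 c then acc else (PySem.Set.add acc.1 c, acc.2 ++ [c]))
    (PySem.Set.empty, [])
  let fp := st.2.foldl
    (fun (acc : PySem.Set Int × List Int) x =>
      if PySem.Set.contains acc.1 x then acc else (PySem.Set.add acc.1 x, acc.2 ++ [x]))
    (PySem.Set.empty, [])
  (fc.2, fp.2)

-- ===== PRECONDITION & SPEC =====

-- Pre_ excludes exactly the inputs on which A raises IndexError: the empty board
-- (input_board[0]) and boards with a row shorter than the first row (the main loop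
-- reads input_board[i][j] for every j < len(input_board[0])).
def Pre_generate_cnf_from_input (input_board : List (List Int)) : Prop :=
  input_board ≠ [] ∧ ∀ row ∈ input_board, (input_board.headI).length ≤ row.length

instance (input_board : List (List Int)) : Decidable (Pre_generate_cnf_from_input input_board) := by
  unfold Pre_generate_cnf_from_input; infer_instance

def pvWitness_generate_cnf_from_input : List (List Int) := [[1, 0], [0, 0]]

def Spec_generate_cnf_from_input (input_board : List (List Int)) (out : List (List Int) × List Int) : Prop := out = generate_cnf_from_input_alt input_board
instance (input_board : List (List Int)) (out : List (List Int) × List Int) : Decidable (Spec_generate_cnf_from_input input_board out) := by unfold Spec_generate_cnf_from_input; infer_instance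

-- ===== CLAIM (what is proved, stated in full; the proofs are below) =====
def Claim_equal_generate_cnf_from_input : Prop := ∀ (input_board : List (List Int)), Dom_generate_cnf_from_input input_board → Pre_generate_cnf_from_input input_board → Spec_generate_cnf_from_input input_board (generate_cnf_from_input input_board)

-- ===== LEMMAS AND PROOFS =====

theorem set_contains_eq {α : Type} [BEq α] [LawfulBEq α] (s : PySem.Set α) (x : α) :
    PySem.Set.contains s x = decide (x ∈ s) := by
  unfold PySem.Set.contains; exact List.contains_eq_mem x s

theorem set_add_eq {α : Type} [BEq α] [LawfulBEq α] (s : PySem.Set α) (x : α) :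
    PySem.Set.add s x = if x ∈ s then s else s ++ [x] := by
  show (if PySem.Set.contains s x then s else s ++ [x]) = _
  rw [set_contains_eq]
  by_cases h : x ∈ s <;> simp [h]

theorem foldl_add_eq {α : Type} [BEq α] [LawfulBEq α] (l : List α) (acc : List α) :
    l.foldl PySem.Set.add acc = acc ++ (PySem.List.dedup l).filter (fun x => decide (x ∉ acc)) := by
  induction l generalizing acc with
  | nil => simp [PySem.List.dedup, PySem.Set.ofList]
  | cons x l ih =>
    have hd : PySem.List.dedup (x :: l) = x :: (PySem.List.dedup l).filter (fun z => decide (z ∉ ([x] : List α))) := by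
      rw [PySem.List.dedup_eq_ofList, PySem.Set.ofList_eq_foldl]
      show List.foldl _ (PySem.Set.add [] x) l = _
      rw [set_add_eq]
      simp only [List.not_mem_nil, if_false, List.nil_append]
      rw [ih ([x])]
      simp
    rw [List.foldl_cons, set_add_eq, hd]
    by_cases h : x ∈ acc
    · rw [if_pos h, ih acc]
      congr 1
      simp only [List.filter_cons, decide_eq_true_eq]
      rw [if_neg (by simp [h])]
      rw [List.filter_filter]
      apply List.filter_congr
      intro z hz
      by_cases hzx : z = x <;> simp [hzx, h]
    · rw [if_neg h, ih (acc ++ [x])]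
      simp only [List.filter_cons, decide_eq_true_eq]
      rw [if_pos (by simp [h])]
      simp only [List.append_assoc, List.cons_append, List.nil_append]
      congr 2
      rw [List.filter_filter]
      apply List.filter_congr
      intro z hz
      by_cases hzx : z = x <;> simp [hzx, h]

theorem pd_def {α : Type} [BEq α] [LawfulBEq α] (l : List α) :
    PySem.List.dedup l = l.foldl PySem.Set.add [] := by
  rw [PySem.List.dedup_eq_ofList, PySem.Set.ofList_eq_foldl]

theorem pd_cons {α : Type} [BEq α] [LawfulBEq α] (x : α) (l : List α) :
    PySem.List.dedup (x :: l) = x :: (PySem.List.dedup l).filter (fun z => !(z == x)) := by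
  rw [pd_def, List.foldl_cons, set_add_eq]
  simp only [List.not_mem_nil, if_false, List.nil_append]
  rw [foldl_add_eq]
  simp only [List.singleton_append, List.cons.injEq, true_and]
  apply List.filter_congr
  intro z _
  simp

theorem pd_append {α : Type} [BEq α] [LawfulBEq α] (A B : List α) :
    PySem.List.dedup (A ++ B) =
      PySem.List.dedup A ++ (PySem.List.dedup B).filter (fun x => decide (x ∉ A)) := by
  rw [pd_def, List.foldl_append, ← pd_def, foldl_add_eq]
  congr 1
  apply List.filter_congr
  intro z _
  simp

theorem pd_eq_self {α : Type} [BEq α] [LawfulBEq α] {l : List α} (h : l.Nodup) :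
    PySem.List.dedup l = l := by
  induction l with
  | nil => rfl
  | cons x l ih =>
    rw [pd_cons, ih h.of_cons]
    have hx : x ∉ l := (List.nodup_cons.mp h).1
    rw [List.filter_eq_self.mpr]
    intro z hz
    simp only [Bool.not_eq_eq_eq_not, Bool.not_true, beq_eq_false_iff_ne, ne_eq]
    exact fun hzx => hx (hzx ▸ hz)

theorem filter_pd {α : Type} [BEq α] [LawfulBEq α] (p : α → Bool) (l : List α) :
    (PySem.List.dedup l).filter p = PySem.List.dedup (l.filter p) := by
  induction l with
  | nil => rfl
  | cons x l ih =>
    rw [pd_cons, List.filter_cons, List.filter_cons]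
    cases hp : p x with
    | true =>
      simp only [if_true]
      rw [pd_cons, ← ih, List.filter_filter, List.filter_filter]
      congr 1
      apply List.filter_congr
      intro z _
      rw [Bool.and_comm]
    | false =>
      simp only [Bool.false_eq_true, if_false]
      rw [← ih, List.filter_filter]
      apply List.filter_congr
      intro z _
      by_cases hzx : z = x
      · subst hzx; simp [hp]
      · simp [hzx]

theorem pd_map_inj {α β : Type} [BEq α] [LawfulBEq α] [BEq β] [LawfulBEq β]
    (f : α → β) (hf : Function.Injective f) (l : List α) :
    PySem.List.dedup (l.map f) = (PySem.List.dedup l).map f := by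
  induction l with
  | nil => rfl
  | cons x l ih =>
    rw [List.map_cons, pd_cons, pd_cons, ih, List.filter_map, List.map_cons]
    congr 2
    apply List.filter_congr
    intro z _
    by_cases hz : z = x
    · subst hz; simp
    · have hfz : f z ≠ f x := fun h2 => hz (hf h2)
      simp [hz, hfz]

theorem pd_flatMap_congr {α β : Type} [BEq β] [LawfulBEq β] (l : List α) (h h' : α → List β)
    (heq : ∀ i ∈ l, PySem.List.dedup (h i) = PySem.List.dedup (h' i)) :
    PySem.List.dedup (l.flatMap h) = PySem.List.dedup (l.flatMap h') := by
  induction l with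
  | nil => rfl
  | cons x l ih =>
    rw [List.flatMap_cons, List.flatMap_cons, pd_append, pd_append]
    rw [heq x (by simp), ih (fun i hi => heq i (by simp [hi]))]
    congr 1
    apply List.filter_congr
    intro z _
    have : z ∈ h x ↔ z ∈ h' x := by
      rw [← PySem.List.mem_dedup, heq x (by simp), PySem.List.mem_dedup]
    simp [this]

theorem nodup_combinations {α : Type} {xs : List α} (h : xs.Nodup) (r : ℕ) :
    (PySem.List.combinations xs r).Nodup := by
  induction xs generalizing r with
  | nil =>
    cases r with
    | zero => rw [PySem.List.combinations_zero]; simp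
    | succ r => rw [PySem.List.combinations_nil_succ]; simp
  | cons x xs ih =>
    cases r with
    | zero => rw [PySem.List.combinations_zero]; simp
    | succ r =>
      rw [PySem.List.combinations_cons_succ]
      have hx : x ∉ xs := (List.nodup_cons.mp h).1
      apply List.Nodup.append
      · exact ((ih h.of_cons r).map (fun a b hab => by injection hab))
      · exact ih h.of_cons (r + 1)
      · intro c hc hc'
        rcases List.mem_map.mp hc with ⟨t, _, rfl⟩
        have := (PySem.List.mem_combinations_iff _ _ _).mp hc'
        exact hx (this.1.subset (List.mem_cons_self ..))

theorem pd_flatMap_const {α β : Type} [BEq β] [LawfulBEq β] (l : List α) (v : β) (h : l ≠ []) :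
    PySem.List.dedup (l.flatMap (fun _ => [v])) = [v] := by
  induction l with
  | nil => exact absurd rfl h
  | cons x l ih =>
    rw [List.flatMap_cons, pd_append]
    have hv : PySem.List.dedup ([v] : List β) = [v] := by
      rw [pd_cons]; rfl
    cases l with
    | nil => simpa using hv
    | cons y l =>
      rw [ih (by simp), hv]
      simp

theorem mem_comb_of_eraseIdx {α : Type} {xs : List α} {i : ℕ} {m : ℕ} {c : List α}
    (hc : c ∈ PySem.List.combinations (xs.eraseIdx i) m) : c ∈ PySem.List.combinations xs m := by
  rw [PySem.List.mem_combinations_iff] at hc ⊢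
  exact ⟨hc.1.trans (List.eraseIdx_sublist xs i), hc.2⟩

theorem not_mem_of_comb {α : Type} {xs : List α} {x : α} {m : ℕ} {c : List α}
    (hx : x ∉ xs) (hc : c ∈ PySem.List.combinations xs m) : x ∉ c := by
  rw [PySem.List.mem_combinations_iff] at hc
  exact fun hxc => hx (hc.1.subset hxc)

theorem mm0 : ∀ (arr : List Int), arr.Nodup → ∀ m : ℕ, m < arr.length →
    PySem.List.dedup ((List.range arr.length).flatMap
      (fun i => (PySem.List.combinations (arr.eraseIdx i) m).reverse)) =
    (PySem.List.combinations arr m).reverse := by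
  intro arr
  induction arr with
  | nil => intro _ m hm; simp at hm
  | cons x xs ih =>
    intro hnd m hm
    have hx : x ∉ xs := (List.nodup_cons.mp hnd).1
    cases m with
    | zero =>
      have : ((List.range (x :: xs).length).flatMap
          (fun i => (PySem.List.combinations ((x :: xs).eraseIdx i) 0).reverse)) =
          (List.range (x :: xs).length).flatMap (fun _ => [[]]) := by
        apply List.flatMap_congr
        intro i _
        rw [PySem.List.combinations_zero]
        rfl
      rw [this, pd_flatMap_const _ _ (by simp), PySem.List.combinations_zero]
      rfl
    | succ m' =>
      have hm' : m' + 1 ≤ xs.length := by simpa using hm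
      rw [List.length_cons, List.range_succ_eq_map, List.flatMap_cons, List.flatMap_map]
      simp only [List.eraseIdx_cons_zero, List.eraseIdx_cons_succ, Nat.succ_eq_add_one]
      rw [pd_append, pd_eq_self ((List.nodup_reverse).mpr (nodup_combinations hnd.of_cons _))]
      -- the tail chain
      set rest := (List.range xs.length).flatMap
        (fun i => (PySem.List.combinations (x :: xs.eraseIdx i) (m' + 1)).reverse) with hrest
      have hmem_rest : ∀ c ∈ rest,
          (c ∈ PySem.List.combinations xs (m' + 1) ∧ x ∉ c) ∨ x ∈ c := by
        intro c hc
        rw [hrest, List.mem_flatMap] at hc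
        rcases hc with ⟨i, _, hc⟩
        rw [List.mem_reverse, PySem.List.combinations_cons_succ, List.mem_append] at hc
        rcases hc with hc | hc
        · rcases List.mem_map.mp hc with ⟨t, _, rfl⟩
          right; exact List.mem_cons_self ..
        · left
          have hc' := mem_comb_of_eraseIdx hc
          exact ⟨hc', not_mem_of_comb hx hc'⟩
      -- replace the "not already seen" filter by the "contains x" filter
      have hfc : (PySem.List.dedup rest).filter
            (fun c => decide (c ∉ (PySem.List.combinations xs (m' + 1)).reverse)) =
          (PySem.List.dedup rest).filter (fun c => decide (x ∈ c)) := by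
        apply List.filter_congr
        intro c hc
        rcases hmem_rest c ((PySem.List.mem_dedup _ _).mp hc) with ⟨hin, hxc⟩ | hxc
        · simp [hin, hxc]
        · have : c ∉ (PySem.List.combinations xs (m' + 1)).reverse := by
            rw [List.mem_reverse]
            exact fun hmem => (not_mem_of_comb hx hmem) hxc
          simp [this, hxc]
      rw [hfc, filter_pd]
      -- compute the filtered chain
      have hflt : rest.filter (fun c => decide (x ∈ c)) =
          List.map (fun c => x :: c) ((List.range xs.length).flatMap
            (fun i => (PySem.List.combinations (xs.eraseIdx i) m').reverse)) := by
        rw [hrest, List.filter_flatMap, List.map_flatMap]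
        apply List.flatMap_congr
        intro i _
        rw [PySem.List.combinations_cons_succ, List.reverse_append, List.filter_append]
        rw [List.filter_eq_nil_iff.mpr, List.nil_append]
        · rw [← List.map_reverse, List.filter_map, List.filter_eq_self.mpr]
          intro t _
          simp
        · intro c hc
          rw [List.mem_reverse] at hc
          simp [not_mem_of_comb hx (mem_comb_of_eraseIdx hc)]
      rw [hflt, pd_map_inj _ (List.cons_injective), ih hnd.of_cons m' (by omega)]
      rw [PySem.List.combinations_cons_succ, List.reverse_append, ← List.map_reverse]

def gsrN : ℕ → List Int → List (List Int)
  | 0, arr => if arr.length > 0 then [arr] else []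
  | r + 1, arr => (List.range arr.length).flatMap (fun i => gsrN r (arr.eraseIdx i))

def subsK (arr : List Int) (r : ℕ) : List (List Int) :=
  if r < arr.length then (PySem.List.combinations arr (arr.length - r)).reverse else []

theorem nodup_subsK {arr : List Int} (h : arr.Nodup) (r : ℕ) : (subsK arr r).Nodup := by
  unfold subsK
  split
  · exact (List.nodup_reverse).mpr (nodup_combinations h _)
  · exact List.nodup_nil

theorem gsrN_dedup : ∀ (r : ℕ), 1 ≤ r → ∀ (arr : List Int), arr.Nodup →
    PySem.List.dedup (gsrN r arr) = subsK arr r := by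
  intro r
  induction r with
  | zero => omega
  | succ r'' ih =>
    intro _ arr hnd
    cases r'' with
    | zero =>
      -- r = 1
      match arr with
      | [] => rfl
      | [x] => rfl
      | x :: y :: t =>
        show PySem.List.dedup ((List.range (x :: y :: t).length).flatMap
          (fun i => gsrN 0 ((x :: y :: t).eraseIdx i))) = _
        set arr := x :: y :: t with harr
        have hlen : 2 ≤ arr.length := by simp [harr]
        have hcg : (List.range arr.length).flatMap (fun i => gsrN 0 (arr.eraseIdx i)) =
            (List.range arr.length).flatMap
              (fun i => (PySem.List.combinations (arr.eraseIdx i) (arr.length - 1)).reverse) := by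
          apply List.flatMap_congr
          intro i hi
          have hi' : i < arr.length := List.mem_range.mp hi
          have hle : (arr.eraseIdx i).length = arr.length - 1 := by
            rw [List.length_eraseIdx]; simp [hi']
          show gsrN 0 (arr.eraseIdx i) = _
          rw [show arr.length - 1 = (arr.eraseIdx i).length from hle.symm,
            PySem.List.combinations_length_self]
          unfold gsrN
          rw [if_pos (by omega)]
          rfl
        rw [hcg, mm0 arr hnd (arr.length - 1) (by omega)]
        unfold subsK
        rw [if_pos (by omega)]
    | succ r' =>
      -- r = r' + 2, IH applies to r' + 1 ≥ 1
      have hstep : PySem.List.dedup (gsrN (r' + 1 + 1) arr) =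
          PySem.List.dedup ((List.range arr.length).flatMap
            (fun i => subsK (arr.eraseIdx i) (r' + 1))) := by
        show PySem.List.dedup ((List.range arr.length).flatMap
          (fun i => gsrN (r' + 1) (arr.eraseIdx i))) = _
        apply pd_flatMap_congr
        intro i _
        rw [ih (by omega) _ (hnd.eraseIdx i), pd_eq_self (nodup_subsK (hnd.eraseIdx i) _)]
      rw [hstep]
      rcases Nat.lt_or_ge (r' + 1) (arr.length - 1) with hlt | hge
      · have hcg : (List.range arr.length).flatMap (fun i => subsK (arr.eraseIdx i) (r' + 1)) =
            (List.range arr.length).flatMap (fun i =>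
              (PySem.List.combinations (arr.eraseIdx i) (arr.length - 1 - (r' + 1))).reverse) := by
          apply List.flatMap_congr
          intro i hi
          have hi' : i < arr.length := List.mem_range.mp hi
          have hle : (arr.eraseIdx i).length = arr.length - 1 := by
            rw [List.length_eraseIdx]; simp [hi']
          unfold subsK
          rw [if_pos (by omega), hle]
        rw [hcg, mm0 arr hnd _ (by omega)]
        unfold subsK
        rw [if_pos (by omega)]
        congr 2
        omega
      · have hcg : (List.range arr.length).flatMap (fun i => subsK (arr.eraseIdx i) (r' + 1)) =
            (List.range arr.length).flatMap (fun _ => ([] : List (List Int))) := by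
          apply List.flatMap_congr
          intro i hi
          have hi' : i < arr.length := List.mem_range.mp hi
          have hle : (arr.eraseIdx i).length = arr.length - 1 := by
            rw [List.length_eraseIdx]; simp [hi']
          unfold subsK
          rw [if_neg (by omega)]
        have hnil : (List.range arr.length).flatMap (fun _ => ([] : List (List Int))) = [] := by
          simp
        rw [hcg, hnil]
        unfold subsK
        rw [if_neg (by omega)]
        rfl


theorem gsr_eq_gsrN : ∀ (r : ℕ) (k : Int) (arr : List Int), k - 1 = (r : Int) →
    generate_subarrays_recursive arr k = gsrN r arr := by
  intro r
  induction r with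
  | zero =>
    intro k arr hk
    rw [generate_subarrays_recursive, if_pos (by omega)]
    rfl
  | succ r' ih =>
    intro k arr hk
    rw [generate_subarrays_recursive, if_neg (by omega)]
    rw [PySem.List.foldl_append_eq_flatMap, List.nil_append]
    show (PySem.List.pyRange 0 ((arr.length : ℕ) : Int)).flatMap _ = _
    rw [PySem.List.pyRange_zero_nat, List.flatMap_map]
    apply List.flatMap_congr
    intro i hi
    have hi' : i < arr.length := List.mem_range.mp hi
    have h1 : PySem.List.slice arr none (some (i : Int)) = List.take i arr := by
      rw [PySem.List.slice_to arr (by omega)]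
      simp
    have h2 : PySem.List.slice arr (some ((i : Int) + 1)) = List.drop (i + 1) arr := by
      rw [PySem.List.slice_from arr (by omega)]
      have : ((i : Int) + 1).toNat = i + 1 := by omega
      rw [this]
    rw [h1, h2, ← List.eraseIdx_eq_take_drop_succ]
    exact ih (k - 1) _ (by omega)


theorem foldl_seen_pair {α : Type} [BEq α] [LawfulBEq α] :
    ∀ (l : List α) (s : List α),
      l.foldl (fun (st : PySem.Set α × List α) x =>
        if PySem.Set.contains st.1 x then st else (PySem.Set.add st.1 x, st.2 ++ [x]))
        (s, s) = (l.foldl PySem.Set.add s, l.foldl PySem.Set.add s) := by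
  intro l
  induction l with
  | nil => intro s; rfl
  | cons x l ih =>
    intro s
    rw [List.foldl_cons, List.foldl_cons]
    cases hc : PySem.Set.contains s x with
    | true =>
      rw [if_pos rfl]
      have : PySem.Set.add s x = s := by
        show (if PySem.Set.contains s x then s else s ++ [x]) = s
        rw [hc, if_pos rfl]
      rw [this]
      exact ih s
    | false =>
      rw [if_neg (by simp [hc])]
      have : PySem.Set.add s x = s ++ [x] := by
        show (if PySem.Set.contains s x then s else s ++ [x]) = s ++ [x]
        rw [hc, if_neg (by simp)]
      rw [this]
      exact ih (s ++ [x])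

theorem foldl_seen_pair_snd {α : Type} [BEq α] [LawfulBEq α] (l : List α) :
    (l.foldl (fun (st : PySem.Set α × List α) x =>
        if PySem.Set.contains st.1 x then st else (PySem.Set.add st.1 x, st.2 ++ [x]))
      (PySem.Set.empty, [])).2 = PySem.List.dedup l := by
  rw [show (PySem.Set.empty : PySem.Set α) = ([] : List α) from rfl, foldl_seen_pair, pd_def]

theorem remove_duplicates_eq_dedup (l : List (List Int)) :
    remove_duplicates l = PySem.List.dedup l := by
  unfold remove_duplicates
  rw [foldl_seen_pair_snd]

-- per-cell clause lists: A's dedup of the deletion recursion is B's reversed combinations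
theorem percell (vars : List Int) (hnd : vars.Nodup) (v : Int) :
    remove_duplicates (generate_subarrays_recursive vars v) = subsets_alt vars v := by
  rw [remove_duplicates_eq_dedup]
  by_cases hv : v ≤ 1
  · rw [generate_subarrays_recursive, if_pos (by omega)]
    unfold subsets_alt
    rw [if_pos hv]
    cases vars with
    | nil => rfl
    | cons x t =>
      have h1 : ((x :: t) : List Int).length > 0 := by simp
      rw [if_pos h1, pd_eq_self (by simp : ([x :: t] : List (List Int)).Nodup)]
      simp
  · have hv2 : 2 ≤ v := by omega
    have hk : v - 1 = (((v - 1).toNat : ℕ) : Int) := by omega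
    rw [gsr_eq_gsrN (v - 1).toNat v vars hk, gsrN_dedup _ (by omega) vars hnd]
    unfold subsK subsets_alt
    by_cases hlt : (v - 1).toNat < vars.length
    · rw [if_pos hlt, if_neg (show ¬ v ≤ 1 by omega),
        if_neg (show ¬ ((vars.length : Int) ≤ v - 1) by omega)]
    · rw [if_neg hlt, if_neg (show ¬ v ≤ 1 by omega),
        if_pos (show (vars.length : Int) ≤ v - 1 by omega)]

theorem make_final_cnf_eq (l : List (List (List Int))) :
    make_final_cnf l = PySem.List.dedup l.flatten := by
  unfold make_final_cnf
  have hbody : ∀ (u : List (List Int)) (s : List Int),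
      (if s ∈ u then u else u ++ [s]) = PySem.Set.add u s := by
    intro u s
    rw [set_add_eq]
  simp only [hbody]
  rw [pd_def]

theorem varIdx_inj {n x1 y1 x2 y2 : Int} (h1 : 0 ≤ y1) (h2 : y1 < n) (h3 : 0 ≤ y2)
    (h4 : y2 < n) (he : x1 * n + y1 + 1 = x2 * n + y2 + 1) : x1 = x2 ∧ y1 = y2 := by
  have hx : x1 = x2 := by
    rcases lt_trichotomy x1 x2 with h | h | h
    · exfalso
      have hle : (x1 + 1) * n ≤ x2 * n :=
        mul_le_mul_of_nonneg_right (by omega) (by omega)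
      have e1 : (x1 + 1) * n = x1 * n + n := by ring
      linarith
    · exact h
    · exfalso
      have hle : (x2 + 1) * n ≤ x1 * n :=
        mul_le_mul_of_nonneg_right (by omega) (by omega)
      have e1 : (x2 + 1) * n = x2 * n + n := by ring
      linarith
  subst hx
  exact ⟨rfl, by linarith⟩

theorem neighbor_vars_eq_map (i j m n : Int) (b : List (List Int)) :
    neighbor_vars i j m n b =
      (pvDirections.filter (fun d => decide (0 ≤ i + d.1 ∧ i + d.1 < m ∧ 0 ≤ j + d.2 ∧
          j + d.2 < n ∧
          PySem.List.pyGetD (PySem.List.pyGetD b (i + d.1) []) (j + d.2) 0 ≤ 0))).map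
        (fun d => (i + d.1) * n + (j + d.2) + 1) := by
  unfold neighbor_vars
  rw [PySem.List.foldl_append_ite
    (p := fun d : Int × Int => 0 ≤ i + d.1 ∧ i + d.1 < m ∧ 0 ≤ j + d.2 ∧ j + d.2 < n ∧
      PySem.List.pyGetD (PySem.List.pyGetD b (i + d.1) []) (j + d.2) 0 ≤ 0)
    (f := fun d : Int × Int => (i + d.1) * n + (j + d.2) + 1)]
  rw [List.nil_append]

theorem adj_vars_eq (i j m n : Int) (b : List (List Int)) :
    (get_adjacent_cells i j m n b).map (fun p => varIdx p.1 p.2 n) = neighbor_vars i j m n b := by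
  unfold get_adjacent_cells
  have hbody : ∀ (acc : List (Int × Int)) (d : Int × Int),
      (let x := i + d.1; let y := j + d.2
       if 0 ≤ x ∧ x < m ∧ 0 ≤ y ∧ y < n then
         if PySem.List.pyGetD (PySem.List.pyGetD b x []) y 0 > 0 then acc
         else acc ++ [(x, y)]
       else acc) =
      (if (0 ≤ i + d.1 ∧ i + d.1 < m ∧ 0 ≤ j + d.2 ∧ j + d.2 < n ∧
            PySem.List.pyGetD (PySem.List.pyGetD b (i + d.1) []) (j + d.2) 0 ≤ 0)
        then acc ++ [(i + d.1, j + d.2)] else acc) := by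
    intro acc d
    dsimp only
    by_cases h1 : 0 ≤ i + d.1 ∧ i + d.1 < m ∧ 0 ≤ j + d.2 ∧ j + d.2 < n
    · rw [if_pos h1]
      by_cases h2 : PySem.List.pyGetD (PySem.List.pyGetD b (i + d.1) []) (j + d.2) 0 > 0
      · rw [if_pos h2, if_neg (by omega)]
      · rw [if_neg h2, if_pos (by constructor <;> omega)]
    · rw [if_neg h1, if_neg (by omega)]
  simp only [hbody]
  rw [PySem.List.foldl_append_ite
    (p := fun d : Int × Int => 0 ≤ i + d.1 ∧ i + d.1 < m ∧ 0 ≤ j + d.2 ∧ j + d.2 < n ∧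
      PySem.List.pyGetD (PySem.List.pyGetD b (i + d.1) []) (j + d.2) 0 ≤ 0)
    (f := fun d : Int × Int => (i + d.1, j + d.2))]
  rw [List.nil_append, List.map_map, neighbor_vars_eq_map]
  rfl

theorem nodup_neighbor_vars (i j m n : Int) (b : List (List Int)) :
    (neighbor_vars i j m n b).Nodup := by
  rw [neighbor_vars_eq_map]
  have hbase : (pvDirections.filter (fun d => decide (0 ≤ i + d.1 ∧ i + d.1 < m ∧
      0 ≤ j + d.2 ∧ j + d.2 < n ∧
      PySem.List.pyGetD (PySem.List.pyGetD b (i + d.1) []) (j + d.2) 0 ≤ 0))).Nodup :=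
    List.Nodup.filter _ (by decide)
  apply List.Nodup.map_on _ hbase
  intro p hp q hq he
  have hpc := (List.mem_filter.mp hp).2
  have hqc := (List.mem_filter.mp hq).2
  simp only [decide_eq_true_eq] at hpc hqc
  have := varIdx_inj hpc.2.2.1 hpc.2.2.2.1 hqc.2.2.1 hqc.2.2.2.1
    (by simpa [varIdx] using he)
  exact Prod.ext (by omega) (by omega)

theorem foldl_rel {ι σA σB : Type} (l : List ι) (fA : σA → ι → σA) (fB : σB → ι → σB)
    (R : σA → σB → Prop) (h : ∀ a b x, x ∈ l → R a b → R (fA a x) (fB b x)) :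
    ∀ a b, R a b → R (l.foldl fA a) (l.foldl fB b) := by
  induction l with
  | nil => intro a b hab; exact hab
  | cons x l ih =>
    intro a b hab
    rw [List.foldl_cons, List.foldl_cons]
    exact ih (fun a b y hy => h a b y (by simp [hy])) _ _ (h a b x (by simp) hab)

theorem main_eq (b : List (List Int)) (hne : b ≠ [])
    (hrows : ∀ row ∈ b, (b.headI).length ≤ row.length) :
    generate_cnf_from_input b = generate_cnf_from_input_alt b := by
  have hb0 : PySem.List.pyGetD b 0 [] = b.headI := by
    cases b with
    | nil => exact absurd rfl hne
    | cons h t => simpa using PySem.List.pyGetD_natCast (h :: t) 0 []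
  have hE : b.isEmpty = false := by
    cases b with
    | nil => exact absurd rfl hne
    | cons h t => rfl
  simp only [generate_cnf_from_input, generate_cnf_from_input_alt, hb0, hE,
    Bool.false_eq_true, if_false]
  rw [make_final_cnf_eq, foldl_seen_pair_snd, foldl_seen_pair_snd]
  simp only [convert_pending_cells]
  rw [PySem.List.enumerate_eq_map_pyRange b ([] : List Int)]
  simp only [PySem.List.len_eq, List.foldl_map]
  have hst := foldl_rel (PySem.List.pyRange 0 (b.length : Int))
    (fA := fun st i =>
      (PySem.List.pyRange 0 ((b.headI.length : ℕ) : Int)).foldl (fun st j =>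
        let cell_value := PySem.List.pyGetD (PySem.List.pyGetD b i []) j 0
        if cell_value ≠ 0 then
          let adjacent_cells := get_adjacent_cells i j (b.length : Int) ((b.headI.length : ℕ) : Int) b
          let adjacent_mine_vars := adjacent_cells.map (fun p => varIdx p.1 p.2 ((b.headI.length : ℕ) : Int))
          let adjacent_mine_vars_negated := adjacent_cells.map (fun p => -varIdx p.1 p.2 ((b.headI.length : ℕ) : Int))
          let pending_cells := st.2 ++ [adjacent_mine_vars]
          let num_adj_cells : Int := adjacent_mine_vars.length
          let L := remove_duplicates (generate_subarrays_recursive adjacent_mine_vars cell_value)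
          let cnf_clauses := st.1 ++ [L]
          if cell_value ≠ num_adj_cells then
            (cnf_clauses ++
              [remove_duplicates (generate_subarrays_recursive adjacent_mine_vars_negated
                  (num_adj_cells - cell_value))],
              pending_cells)
          else (cnf_clauses, pending_cells)
        else st) st)
    (fB := fun st i =>
      (PySem.List.enumerate (PySem.List.slice (PySem.List.pyGetD b i []) none
          (some ((b.headI.length : ℕ) : Int)))).foldl (fun st q =>
        if q.2 ≠ 0 then
          let vars := neighbor_vars i q.1 (b.length : Int) ((b.headI.length : ℕ) : Int) b
          let pending := st.2 ++ vars
          let clauses := st.1 ++ subsets_alt vars q.2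
          if q.2 ≠ (vars.length : Int) then
            (clauses ++ subsets_alt (vars.map (fun x => -x)) ((vars.length : Int) - q.2), pending)
          else (clauses, pending)
        else st) st)
    (R := fun a b' => b'.1 = a.1.flatten ∧ b'.2 = a.2.flatten)
    ?step ([], []) ([], []) ⟨rfl, rfl⟩
  case step =>
    intro sA sB i hi hR
    dsimp only
    have hi' : 0 ≤ i ∧ i < (b.length : Int) := PySem.List.mem_pyRange_one.mp hi
    have hrowmem : PySem.List.pyGetD b i [] ∈ b := by
      rw [PySem.List.pyGetD_eq_getElem b [] hi'.1 hi'.2]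
      exact List.getElem_mem _
    have hrlen : b.headI.length ≤ (PySem.List.pyGetD b i []).length := hrows _ hrowmem
    have hslice : PySem.List.slice (PySem.List.pyGetD b i []) none (some ((b.headI.length : ℕ) : Int)) =
        List.take b.headI.length (PySem.List.pyGetD b i []) := by
      rw [PySem.List.slice_to _ (by omega)]
      simp
    rw [hslice, PySem.List.enumerate_eq_map_pyRange _ (0 : Int)]
    simp only [PySem.List.len_eq, List.length_take, List.foldl_map]
    have hlen : min b.headI.length (PySem.List.pyGetD b i []).length = b.headI.length :=
      min_eq_left hrlen
    rw [hlen]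
    refine foldl_rel _ _ _
      (R := fun (a : List (List (List Int)) × List (List Int)) (b' : List (List Int) × List Int) =>
        b'.1 = a.1.flatten ∧ b'.2 = a.2.flatten) ?istep _ _ hR
    case istep =>
      intro a2 b2 j hj hR2
      have hj' : 0 ≤ j ∧ j < ((b.headI.length : ℕ) : Int) := PySem.List.mem_pyRange_one.mp hj
      have hval : PySem.List.pyGetD (List.take b.headI.length (PySem.List.pyGetD b i [])) j 0 =
          PySem.List.pyGetD (PySem.List.pyGetD b i []) j 0 := by
        rw [PySem.List.pyGetD_eq_getElem _ _ hj'.1 (by simp; omega),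
          PySem.List.pyGetD_eq_getElem _ _ hj'.1 (by omega)]
        exact List.getElem_take
      rw [hval]
      by_cases hv : PySem.List.pyGetD (PySem.List.pyGetD b i []) j 0 ≠ 0
      · rw [if_pos hv, if_pos hv]
        have hvars := adj_vars_eq i j (b.length : Int) ((b.headI.length : ℕ) : Int) b
        have hnegvars : (get_adjacent_cells i j (b.length : Int) ((b.headI.length : ℕ) : Int) b).map
            (fun p => -varIdx p.1 p.2 ((b.headI.length : ℕ) : Int)) =
            (neighbor_vars i j (b.length : Int) ((b.headI.length : ℕ) : Int) b).map (fun x => -x) := by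
          rw [← hvars, List.map_map]
          rfl
        have hnd := nodup_neighbor_vars i j (b.length : Int) ((b.headI.length : ℕ) : Int) b
        have hndneg : ((neighbor_vars i j (b.length : Int) ((b.headI.length : ℕ) : Int) b).map
            (fun x : Int => -x)).Nodup := hnd.map (fun x y h => by omega)
        rw [hvars, hnegvars, percell _ hnd, percell _ hndneg]
        by_cases hcond : PySem.List.pyGetD (PySem.List.pyGetD b i []) j 0 ≠
            ((neighbor_vars i j (b.length : Int) ((b.headI.length : ℕ) : Int) b).length : Int)
        · rw [if_pos hcond, if_pos hcond]
          refine ⟨?_, ?_⟩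
          · simp [hR2.1, List.flatten_append]
          · simp [hR2.2, List.flatten_append]
        · rw [if_neg hcond, if_neg hcond]
          refine ⟨?_, ?_⟩
          · simp [hR2.1, List.flatten_append]
          · simp [hR2.2, List.flatten_append]
      · rw [if_neg hv, if_neg hv]
        exact hR2
  refine Prod.ext ?_ ?_
  · simp only [hst.1]
  · simp only [hst.2]

-- ===== VERDICT (by name: the statement is the Claim_ definition above) =====
theorem generate_cnf_from_input_spec : Claim_equal_generate_cnf_from_input := by
  intro input_board _ hPre
  unfold Spec_generate_cnf_from_input
  exact main_eq input_board hPre.1 hPre.2
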